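-- pv_equiv track=rewrite | github.com/FreeA7/AlgorithmProblems | find_largest_triangle_in_hexagon.py | getMapList
-- ===== SOURCE A (Python) =====
-- def getMapList(a, maps):
--     map_lists = []
--     for i in range(a):
--         temp = maps[:((2*(a+i))+1)]
--         temp = list(map(lambda x:[1,1] if x==1 else [0,0], temp))
--         map_lists.append(temp)
--         maps = maps[((2*(a+i))+1):]
--     for i in range(a):
--         temp = maps[:(((4*a)-1)-(2*i))]
--         temp = list(map(lambda x:[1,1] if x==1 else [0,0], temp))
--         map_lists.append(temp)
--         maps = maps[(((4*a)-1)-(2*i)):]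
--     return map_lists
-- ===== SOURCE B (Python) =====
-- def getMapList(a, maps):
--     map_lists = []
--     pos = 0
--     for j in range(2 * a):
--         size = 2 * (a + j) + 1 if j < a else 4 * a - 1 - 2 * (j - a)
--         map_lists.append([[1, 1] if x == 1 else [0, 0] for x in maps[pos:pos + size]])
--         pos += size
--     return map_lists
-- ===== Notes on version B (the rewrite author's own statement) =====
-- stated objective: simpler
-- what changed: B is a single loop over one index j in range(2*a) that computes each row's size in place and reads the row through a moving cursor into the untouched input list, instead of A's two loops that each repeatedly reslice and reassign the shrinking remainder of maps.
import Mathlib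
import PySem

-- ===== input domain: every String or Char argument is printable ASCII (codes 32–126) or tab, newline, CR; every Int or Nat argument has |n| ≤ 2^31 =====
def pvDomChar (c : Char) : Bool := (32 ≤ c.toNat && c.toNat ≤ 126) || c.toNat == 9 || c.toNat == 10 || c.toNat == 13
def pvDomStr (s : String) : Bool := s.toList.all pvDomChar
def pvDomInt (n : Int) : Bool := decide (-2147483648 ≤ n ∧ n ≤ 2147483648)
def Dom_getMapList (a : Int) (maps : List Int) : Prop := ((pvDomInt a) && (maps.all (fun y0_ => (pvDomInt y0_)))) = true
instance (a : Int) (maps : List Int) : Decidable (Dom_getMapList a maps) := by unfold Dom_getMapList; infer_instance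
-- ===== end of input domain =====

-- B replaces A's two loops with repeated reslicing/reassignment of `maps` by a
-- precomputed schedule of row sizes and a single cursor-driven pass (objective: simpler).

-- the shared element transform: [1,1] if x == 1 else [0,0]
def pvTf (x : Int) : List Int := if x == 1 then [1, 1] else [0, 0]

-- ===== PORT A =====
def getMapList (a : Int) (maps : List Int) : List (List (List Int)) :=
  let s1 := (PySem.List.pyRange 0 a 1).foldl
    (fun (st : List (List (List Int)) × List Int) i =>
      (st.1 ++ [(PySem.List.slice st.2 none (some (2 * (a + i) + 1))).map pvTf],
       PySem.List.slice st.2 (some (2 * (a + i) + 1)) none))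
    ([], maps)
  let s2 := (PySem.List.pyRange 0 a 1).foldl
    (fun (st : List (List (List Int)) × List Int) i =>
      (st.1 ++ [(PySem.List.slice st.2 none (some (4 * a - 1 - 2 * i))).map pvTf],
       PySem.List.slice st.2 (some (4 * a - 1 - 2 * i)) none))
    s1
  s2.1

-- ===== PORT B =====
def getMapList_alt (a : Int) (maps : List Int) : List (List (List Int)) :=
  ((PySem.List.pyRange 0 (2 * a) 1).foldl
    (fun (st : List (List (List Int)) × Int) j =>
      let size := if j < a then 2 * (a + j) + 1 else 4 * a - 1 - 2 * (j - a)
      (st.1 ++ [(PySem.List.slice maps (some st.2) (some (st.2 + size))).map pvTf],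
       st.2 + size))
    ([], 0)).1

-- ===== PRECONDITION & SPEC =====
def Spec_getMapList (a : Int) (maps : List Int) (out : List (List (List Int))) : Prop := out = getMapList_alt a maps
instance (a : Int) (maps : List Int) (out : List (List (List Int))) : Decidable (Spec_getMapList a maps out) := by unfold Spec_getMapList; infer_instance

-- ===== CLAIM (what is proved, stated in full; the proofs are below) =====
def Claim_equal_getMapList : Prop := ∀ (a : Int) (maps : List Int), Dom_getMapList a maps → Spec_getMapList a maps (getMapList a maps)

-- ===== LEMMAS AND PROOFS =====

/-- A's "slice off the front, keep the rest" fold equals B's "fixed list, moving cursor"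
fold, for any schedule of nonnegative sizes. -/
lemma cursor_eq (maps : List Int) (sizes : List Int) :
    ∀ (acc : List (List (List Int))) (pos : Nat), (∀ s ∈ sizes, 0 ≤ s) →
    (sizes.foldl
      (fun (st : List (List (List Int)) × List Int) s =>
        (st.1 ++ [(PySem.List.slice st.2 none (some s)).map pvTf],
         PySem.List.slice st.2 (some s) none)) (acc, maps.drop pos)).1
    = (sizes.foldl
      (fun (st : List (List (List Int)) × Int) s =>
        (st.1 ++ [(PySem.List.slice maps (some st.2) (some (st.2 + s))).map pvTf],
         st.2 + s)) (acc, (pos : Int))).1 := by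
  induction sizes with
  | nil => intro acc pos _; simp
  | cons s rest ih =>
    intro acc pos hnn
    have hs : 0 ≤ s := hnn s (by simp)
    obtain ⟨n, rfl⟩ : ∃ n : Nat, s = (n : Int) := ⟨s.toNat, (Int.toNat_of_nonneg hs).symm⟩
    simp only [List.foldl_cons]
    have e1 : PySem.List.slice (maps.drop pos) none (some (n : Int)) = (maps.drop pos).take n := by
      rw [PySem.List.slice_to _ hs]; simp
    have e2 : PySem.List.slice (maps.drop pos) (some (n : Int)) none = maps.drop (n + pos) := by
      rw [PySem.List.slice_from _ hs]; simp [List.drop_drop, Nat.add_comm]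
    have e3 : PySem.List.slice maps (some (pos : Int)) (some ((pos : Int) + (n : Int)))
        = (maps.drop pos).take n := PySem.List.slice_natCast_add maps pos n
    rw [e1, e2, e3]
    have := ih (acc ++ [((maps.drop pos).take n).map pvTf]) (n + pos)
      (fun t ht => hnn t (by simp [ht]))
    rw [this]
    norm_num [Nat.add_comm]

/-- A's whole computation, re-associated into one fold over the concatenated size schedule. -/
lemma getMapList_as_fold (a : Int) (maps : List Int) :
    getMapList a maps =
    (((PySem.List.pyRange 0 a 1).map (fun i => 2 * (a + i) + 1)
      ++ (PySem.List.pyRange 0 a 1).map (fun i => 4 * a - 1 - 2 * i)).foldl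
      (fun (st : List (List (List Int)) × List Int) s =>
        (st.1 ++ [(PySem.List.slice st.2 none (some s)).map pvTf],
         PySem.List.slice st.2 (some s) none)) ([], maps)).1 := by
  simp [getMapList, List.foldl_append, List.foldl_map]

/-- range(a, b) is empty when b ≤ a. -/
lemma pyRange_nil {a b : Int} (h : b ≤ a) : PySem.List.pyRange a b 1 = [] := by
  have := PySem.List.length_pyRange_one a b
  exact List.eq_nil_of_length_eq_zero (by omega)

/-- range(c, c+n) is range(0, n) shifted by c. -/
lemma pyRange_shift (c : Int) : ∀ n : Nat,
    PySem.List.pyRange c (c + (n : Int)) 1 = (PySem.List.pyRange 0 (n : Int) 1).map (fun i => c + i) := by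
  intro n
  induction n with
  | zero => simp [pyRange_nil (le_refl c), pyRange_nil (le_refl (0:Int))]
  | succ n ih =>
    have h1 : c + ((n + 1 : Nat) : Int) = (c + n) + 1 := by push_cast; ring
    have h2 : ((n + 1 : Nat) : Int) = (n : Int) + 1 := by push_cast; ring
    rw [h1, h2, PySem.List.pyRange_one_succ_right (by omega),
      PySem.List.pyRange_one_succ_right (by exact_mod_cast Int.natCast_nonneg n), List.map_append, ih]
    simp

/-- B's size schedule, indexed by j ∈ range(2a), is A's two size schedules concatenated. -/
lemma sizes_eq (a : Int) :
    (PySem.List.pyRange 0 (2 * a) 1).map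
        (fun j => if j < a then 2 * (a + j) + 1 else 4 * a - 1 - 2 * (j - a))
    = (PySem.List.pyRange 0 a 1).map (fun i => 2 * (a + i) + 1)
      ++ (PySem.List.pyRange 0 a 1).map (fun i => 4 * a - 1 - 2 * i) := by
  by_cases ha : a ≤ 0
  · rw [pyRange_nil (by omega), pyRange_nil ha]; simp
  · obtain ⟨n, hn⟩ : ∃ n : Nat, a = (n : Int) := ⟨a.toNat, (Int.toNat_of_nonneg (by omega)).symm⟩
    have hsplit : PySem.List.pyRange 0 (2 * a) 1
        = PySem.List.pyRange 0 a 1 ++ PySem.List.pyRange a (2 * a) 1 :=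
      PySem.List.pyRange_one_append 0 a (2 * a) (by omega) (by omega)
    have hshift : PySem.List.pyRange a (2 * a) 1
        = (PySem.List.pyRange 0 a 1).map (fun i => a + i) := by
      have : 2 * a = a + (n : Int) := by omega
      rw [this, pyRange_shift a n, hn]
    rw [hsplit, List.map_append, hshift, List.map_map]
    congr 1
    · apply List.map_congr_left
      intro i hi
      have := (PySem.List.mem_pyRange_one).1 hi
      rw [if_pos (by omega)]
    · apply List.map_congr_left
      intro i hi
      have := (PySem.List.mem_pyRange_one).1 hi
      simp only [Function.comp_apply]
      rw [if_neg (by omega)]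
      ring

-- ===== VERDICT (by name: the statement is the Claim_ definition above) =====
theorem getMapList_spec : Claim_equal_getMapList := by
  intro a maps _
  unfold Spec_getMapList getMapList_alt
  rw [getMapList_as_fold]
  have hB : ((PySem.List.pyRange 0 (2 * a) 1).foldl
      (fun (st : List (List (List Int)) × Int) j =>
        let size := if j < a then 2 * (a + j) + 1 else 4 * a - 1 - 2 * (j - a)
        (st.1 ++ [(PySem.List.slice maps (some st.2) (some (st.2 + size))).map pvTf],
         st.2 + size)) ([], 0))
      = (((PySem.List.pyRange 0 (2 * a) 1).map
          (fun j => if j < a then 2 * (a + j) + 1 else 4 * a - 1 - 2 * (j - a))).foldl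
        (fun (st : List (List (List Int)) × Int) s =>
          (st.1 ++ [(PySem.List.slice maps (some st.2) (some (st.2 + s))).map pvTf],
           st.2 + s)) ([], 0)) := by
    rw [List.foldl_map]
  rw [hB, sizes_eq]
  have h := cursor_eq maps
    ((PySem.List.pyRange 0 a 1).map (fun i => 2 * (a + i) + 1)
      ++ (PySem.List.pyRange 0 a 1).map (fun i => 4 * a - 1 - 2 * i)) [] 0
    (by
      intro s hs
      rcases List.mem_append.1 hs with h | h <;>
        · obtain ⟨i, hi, rfl⟩ := List.mem_map.1 h
          have := (PySem.List.mem_pyRange_one).1 hi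
          omega)
  simpa using h
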